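-- pv_equiv track=rewrite | github.com/LucasMayer02/UFCG_Exercicios | atividades/force_sort/questao.py | force_sort
-- ===== SOURCE A (Python) =====
-- def force_sort(seq) :
--     if len(seq) == 0 :
--         return []
--     resultado = [0]
--     for i in range(1, len(seq)) :
--         if seq[i] < seq[i-1] :
--             resultado.append(seq[i-1] - seq[i])
--             seq[i] = seq[i-1]
--         else :
--             resultado.append(0)
--     return resultado
-- ===== SOURCE B (Python) =====
-- def force_sort(seq):
--     if not seq:
--         return []
--
--     def rec(m, xs):
--         # increments for xs given running max m so far, and the running max afterwards
--         if len(xs) == 1: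
--             mm = m if m > xs[0] else xs[0]
--             return [mm - xs[0]], mm
--         h = len(xs) // 2
--         left, ml = rec(m, xs[:h])
--         right, mr = rec(ml, xs[h:])
--         return left + right, mr
--
--     res, _ = rec(seq[0], seq)
--     seq[:] = [x + d for x, d in zip(seq, res)]
--     return res
-- ===== Notes on version B (the rewrite author's own statement) =====
-- stated objective: alternative
-- what changed: Replaces A's stateful left-to-right in-place running-max loop by a recursive divide-and-conquer: solve each half independently, threading the left half's running maximum into the right half, then concatenate the increment lists (mutation done afterwards as one bulk zip assignment).
import Mathlib
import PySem

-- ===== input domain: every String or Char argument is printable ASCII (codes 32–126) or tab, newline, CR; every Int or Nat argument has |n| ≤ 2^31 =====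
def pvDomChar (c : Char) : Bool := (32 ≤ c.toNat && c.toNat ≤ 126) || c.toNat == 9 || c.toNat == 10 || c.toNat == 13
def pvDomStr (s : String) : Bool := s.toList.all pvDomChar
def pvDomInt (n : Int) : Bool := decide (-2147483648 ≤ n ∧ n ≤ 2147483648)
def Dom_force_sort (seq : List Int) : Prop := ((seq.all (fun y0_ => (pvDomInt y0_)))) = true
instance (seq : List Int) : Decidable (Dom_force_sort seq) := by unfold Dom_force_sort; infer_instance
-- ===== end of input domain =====

-- B computes the increments by divide and conquer (solve each half, threading the left half's
-- running max into the right half) instead of A's single in-place left-to-right loop; equivalence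
-- is about the RETURN value (both Pythons leave seq equal to its prefix maxima, a side effect not
-- modelled here).

-- ===== PORT A =====
-- A's `for i in range(1, len(seq))` as recursion on the index i over the mutable list state s;
-- indices i and i-1 are always in range, so `getD _ 0` reads exactly what Python reads.
def forceLoopA (s res : List Int) (i : Nat) : List Int × List Int :=
  if h : i < s.length then
    let si := s.getD i 0
    let sp := s.getD (i - 1) 0
    if si < sp then forceLoopA (s.set i sp) (res ++ [sp - si]) (i + 1)
    else forceLoopA s (res ++ [0]) (i + 1)
  else (s, res)
termination_by s.length - i
decreasing_by
  · simp only [List.length_set]; omega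
  · omega

def force_sort (seq : List Int) : List Int :=
  if seq.length = 0 then [] else (forceLoopA seq [0] 1).2

-- ===== PORT B =====
-- Source B's rec(m, xs): xs[:h]/xs[h:] with the natural number h = len//2 are exactly List.take/drop
-- (PySem slice_to_natCast/slice_from_natCast); rec is only ever called on nonempty xs, so the
-- base test `len(xs) == 1` is ported as `length ≤ 1` purely to make the recursion total
-- (xs[0] on the unreachable empty case read via getD).
def forceRec (m : Int) (xs : List Int) : List Int × Int :=
  if xs.length ≤ 1 then
    let x := xs.getD 0 0
    let mm := if m > x then m else x
    ([mm - x], mm)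
  else
    let h := xs.length / 2
    let p1 := forceRec m (xs.take h)
    let p2 := forceRec p1.2 (xs.drop h)
    (p1.1 ++ p2.1, p2.2)
termination_by xs.length
decreasing_by
  · simp only [List.length_take]; omega
  · simp only [List.length_drop]; omega

def force_sort_alt (seq : List Int) : List Int :=
  if seq.length = 0 then [] else (forceRec (seq.getD 0 0) seq).1

-- ===== PRECONDITION & SPEC =====
def Spec_force_sort (seq : List Int) (out : List Int) : Prop := out = force_sort_alt seq
instance (seq : List Int) (out : List Int) : Decidable (Spec_force_sort seq out) := by unfold Spec_force_sort; infer_instance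

-- ===== CLAIM (what is proved, stated in full; the proofs are below) =====
def Claim_equal_force_sort : Prop := ∀ (seq : List Int), Dom_force_sort seq → Spec_force_sort seq (force_sort seq)

-- ===== LEMMAS AND PROOFS =====

-- common reference: increments produced while running max m meets the remaining elements
def gInc (m : Int) : List Int → List Int
  | [] => []
  | x :: xs => (max m x - x) :: gInc (max m x) xs

theorem getD_append_len {p rest : List Int} {m : Int} :
    (p ++ m :: rest).getD p.length 0 = m := by
  simp [List.getD_eq_getElem?_getD]

theorem getD_append_len_succ {p rest : List Int} {m x : Int} :
    (p ++ m :: x :: rest).getD (p.length + 1) 0 = x := by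
  have h : p.length + 1 = (p ++ [m]).length := by simp
  have e : p ++ m :: x :: rest = (p ++ [m]) ++ x :: rest := by simp
  rw [e, h, getD_append_len]

theorem set_append_len_succ {p rest : List Int} {m x v : Int} :
    (p ++ m :: x :: rest).set (p.length + 1) v = p ++ m :: v :: rest := by
  have e : p ++ m :: x :: rest = (p ++ [m]) ++ x :: rest := by simp
  have e' : p ++ m :: v :: rest = (p ++ [m]) ++ v :: rest := by simp
  rw [e, e', show p.length + 1 = (p ++ [m]).length by simp,
    List.set_append_right _ _ (by simp)]
  simp

theorem forceLoopA_spec (rest : List Int) :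
    ∀ (p : List Int) (m : Int) (res : List Int),
      (forceLoopA (p ++ m :: rest) res (p.length + 1)).2 = res ++ gInc m rest := by
  induction rest with
  | nil =>
    intro p m res
    rw [forceLoopA]
    simp [gInc]
  | cons x rest' ih =>
    intro p m res
    rw [forceLoopA]
    have hlt : p.length + 1 < (p ++ m :: x :: rest').length := by simp
    rw [dif_pos hlt]
    simp only [Nat.add_sub_cancel, getD_append_len_succ, getD_append_len]
    by_cases h : x < m
    · rw [if_pos h, set_append_len_succ]
      have e : p ++ m :: m :: rest' = (p ++ [m]) ++ m :: rest' := by simp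
      have hl : p.length + 1 + 1 = (p ++ [m]).length + 1 := by simp
      rw [e, hl, ih]
      have : max m x = m := by omega
      simp [gInc, this]
    · rw [if_neg h]
      have e : p ++ m :: x :: rest' = (p ++ [m]) ++ x :: rest' := by simp
      have hl : p.length + 1 + 1 = (p ++ [m]).length + 1 := by simp
      rw [e, hl, ih]
      have : max m x = x := by omega
      simp [gInc, this]

-- splitting law for the reference increments: the left part's running max seeds the right part
theorem gInc_append (ys : List Int) :
    ∀ (zs : List Int) (m : Int),
      gInc m (ys ++ zs) = gInc m ys ++ gInc (ys.foldl max m) zs := by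
  induction ys with
  | nil => intro zs m; simp [gInc]
  | cons y ys ih => intro zs m; simp [gInc, ih]

theorem forceRec_spec :
    ∀ (n : Nat) (xs : List Int) (m : Int), xs.length = n → xs ≠ [] →
      forceRec m xs = (gInc m xs, xs.foldl max m) := by
  intro n
  induction n using Nat.strong_induction_on with
  | _ n ih =>
    intro xs m hlen hne
    rw [forceRec]
    by_cases h1 : xs.length ≤ 1
    · rw [if_pos h1]
      have hx : xs.length = 1 := by
        cases xs with
        | nil => exact absurd rfl hne
        | cons a t => simp at h1 ⊢; omega
      obtain ⟨x, rfl⟩ := List.length_eq_one_iff.mp hx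
      have hmm : (if m > x then m else x) = max m x := by omega
      simp [gInc, hmm]
    · rw [if_neg h1]
      have h2 : 2 ≤ xs.length := by omega
      have hh1 : 1 ≤ xs.length / 2 := by omega
      have hh2 : xs.length / 2 < xs.length := by omega
      have htne : xs.take (xs.length / 2) ≠ [] :=
        List.ne_nil_of_length_pos (by rw [List.length_take]; omega)
      have hdne : xs.drop (xs.length / 2) ≠ [] :=
        List.ne_nil_of_length_pos (by rw [List.length_drop]; omega)
      have hlt : (xs.take (xs.length / 2)).length < n := by
        rw [List.length_take]; omega
      have hld : (xs.drop (xs.length / 2)).length < n := by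
        rw [List.length_drop]; omega
      show ((forceRec m (xs.take (xs.length / 2))).1 ++
              (forceRec (forceRec m (xs.take (xs.length / 2))).2
                (xs.drop (xs.length / 2))).1,
            (forceRec (forceRec m (xs.take (xs.length / 2))).2
                (xs.drop (xs.length / 2))).2) = (gInc m xs, List.foldl max m xs)
      rw [ih _ hlt _ m rfl htne, ih _ hld _ _ rfl hdne]
      conv_rhs => rw [← List.take_append_drop (xs.length / 2) xs]
      rw [gInc_append, List.foldl_append]

-- ===== VERDICT (by name: the statement is the Claim_ definition above) =====
theorem force_sort_spec : Claim_equal_force_sort := by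
  intro seq _
  unfold Spec_force_sort force_sort force_sort_alt
  cases seq with
  | nil => simp
  | cons x xs =>
    have hA : (forceLoopA (([] : List Int) ++ x :: xs) [0] (([] : List Int).length + 1)).2
        = [0] ++ gInc x xs := forceLoopA_spec xs [] x [0]
    simp only [List.nil_append, List.length_nil] at hA
    rw [if_neg (by simp), if_neg (by simp), hA,
      forceRec_spec (x :: xs).length (x :: xs) _ rfl (by simp)]
    simp [gInc]
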